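-- pv_equiv track=rewrite | github.com/exPardus/expardus_tracing | expardus_tracing/w3c.py | parse_traceparent
-- ===== SOURCE A (Python) =====
-- def parse_traceparent(traceparent: str | None) -> tuple[str | None, str | None]:
--     """
--     Parse a W3C traceparent header.
--
--     Returns:
--         (trace_id, parent_span_id) or (None, None) if invalid/missing.
--     """
--     if not traceparent:
--         return None, None
--
--     try:
--         parts = traceparent.split("-")
--         if len(parts) != 4 or parts[0] != "00":
--             return None, None
--
--         trace_id, parent_span_id = parts[1], parts[2]
--
--         if len(trace_id) != 32 or not all(
--             c in "0123456789abcdef" for c in trace_id.lower()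
--         ):
--             return None, None
--         if trace_id == "0" * 32:
--             return None, None
--
--         if len(parent_span_id) != 16 or not all(
--             c in "0123456789abcdef" for c in parent_span_id.lower()
--         ):
--             return None, None
--
--         return trace_id.lower(), parent_span_id.lower()
--     except Exception:
--         return None, None
-- ===== SOURCE B (Python) =====
-- def parse_traceparent(traceparent):
--     """Positional parse of a W3C traceparent header (fixed-width fields)."""
--     if traceparent is None or len(traceparent) < 53:
--         return None, None
--     if (traceparent[:3] != "00-" or traceparent[35] != "-"
--             or traceparent[52] != "-" or "-" in traceparent[53:]):
--         return None, None
--     trace_id = traceparent[3:35].lower()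
--     span_id = traceparent[36:52].lower()
--     hexdigits = set("0123456789abcdef")
--     if not hexdigits.issuperset(trace_id) or not hexdigits.issuperset(span_id):
--         return None, None
--     if trace_id == "0" * 32:
--         return None, None
--     return trace_id, span_id
-- ===== Notes on version B (the rewrite author's own statement) =====
-- stated objective: alternative
-- what changed: B replaces A's split('-')-and-validate-parts parsing by a positional fixed-width parse: it checks the three dashes at their mandatory offsets 2/35/52, slices the 32/16-char fields directly, and validates them with a hex-digit set-superset test instead of per-part loops.
import Mathlib
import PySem

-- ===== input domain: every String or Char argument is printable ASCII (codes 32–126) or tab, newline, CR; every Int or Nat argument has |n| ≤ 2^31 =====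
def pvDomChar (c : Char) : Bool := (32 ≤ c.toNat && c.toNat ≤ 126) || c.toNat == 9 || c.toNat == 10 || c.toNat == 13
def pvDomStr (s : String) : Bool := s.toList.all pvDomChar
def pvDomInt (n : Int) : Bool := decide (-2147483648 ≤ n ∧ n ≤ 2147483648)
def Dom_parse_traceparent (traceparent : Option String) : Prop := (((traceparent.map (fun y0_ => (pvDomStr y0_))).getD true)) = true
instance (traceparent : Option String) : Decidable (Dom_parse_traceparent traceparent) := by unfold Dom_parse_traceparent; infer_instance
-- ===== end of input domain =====

-- B parses the traceparent positionally (fixed-width fields at offsets 2/35/52 with a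
-- hex-set superset test) instead of A's split("-")-and-validate-parts loop; same values.


-- the characters of "0123456789abcdef" (A iterates over the string; B builds a set from it)
def pvHexChars : List Char := "0123456789abcdef".toList

-- ===== PORT A =====
-- literal port of A: split on "-", demand 4 parts, "00" version, 32/16-char lowercase-hex
-- fields, non-zero trace id.  'c in "0123456789abcdef"' is ported as membership of the
-- character in the char list (exact for a 1-character needle); parts[1]/parts[2] are read
-- with pyGetD (in range: the length-4 check precedes them, as in the Python).
def parse_traceparent (traceparent : Option String) : Option String × Option String :=
  match traceparent with
  | none => (none, none)          -- 'not traceparent' (None)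
  | some s =>
    if s.toList.isEmpty then (none, none)   -- 'not traceparent' (empty string)
    else
      let parts := PySem.Chars.splitOn s.toList ['-']
      if parts.length ≠ 4 ∨ PySem.List.pyGetD parts 0 [] ≠ ['0', '0'] then (none, none)
      else
        let trace_id := PySem.List.pyGetD parts 1 []
        let parent_span_id := PySem.List.pyGetD parts 2 []
        if trace_id.length ≠ 32 ∨
            ¬ ((PySem.Chars.lower trace_id).all (fun c => pvHexChars.contains c) = true) then
          (none, none)
        else if trace_id = List.replicate 32 '0' then (none, none)
        else if parent_span_id.length ≠ 16 ∨
            ¬ ((PySem.Chars.lower parent_span_id).all (fun c => pvHexChars.contains c) = true) then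
          (none, none)
        else
          (some (String.ofList (PySem.Chars.lower trace_id)),
           some (String.ofList (PySem.Chars.lower parent_span_id)))

-- ===== PORT B =====
-- literal port of Source B: positional parse — length ≥ 53, "00-" prefix, dashes at 35 and 52,
-- no dash in the flags tail, then slice the fixed-width fields and test them against the
-- hex-digit set with issuperset.
def parse_traceparent_alt (traceparent : Option String) : Option String × Option String :=
  match traceparent with
  | none => (none, none)          -- 'traceparent is None'
  | some s =>
    if s.toList.length < 53 then (none, none)
    else if PySem.Chars.slice s.toList none (some 3) ≠ ['0', '0', '-'] ∨
        PySem.Chars.pyGet? s.toList 35 ≠ some '-' ∨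
        PySem.Chars.pyGet? s.toList 52 ≠ some '-' ∨
        PySem.Chars.isIn ['-'] (PySem.Chars.slice s.toList (some 53) none) = true then
      (none, none)
    else
      let trace_id := PySem.Chars.lower (PySem.Chars.slice s.toList (some 3) (some 35))
      let span_id := PySem.Chars.lower (PySem.Chars.slice s.toList (some 36) (some 52))
      if ¬ (PySem.Set.issuperset (PySem.Set.ofList pvHexChars) (PySem.Set.ofList trace_id) = true) ∨
          ¬ (PySem.Set.issuperset (PySem.Set.ofList pvHexChars) (PySem.Set.ofList span_id) = true) then
        (none, none)
      else if trace_id = List.replicate 32 '0' then (none, none)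
      else (some (String.ofList trace_id), some (String.ofList span_id))

-- ===== PRECONDITION & SPEC =====
def Spec_parse_traceparent (traceparent : Option String) (out : Option String × Option String) : Prop := out = parse_traceparent_alt traceparent
instance (traceparent : Option String) (out : Option String × Option String) : Decidable (Spec_parse_traceparent traceparent out) := by unfold Spec_parse_traceparent; infer_instance

-- ===== CLAIM (what is proved, stated in full; the proofs are below) =====
def Claim_equal_parse_traceparent : Prop := ∀ (traceparent : Option String), Dom_parse_traceparent traceparent → Spec_parse_traceparent traceparent (parse_traceparent traceparent)

-- ===== LEMMAS AND PROOFS =====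

-- proof-model of Python's str.split("-"): the dash-separated segments, structurally
def splitDash : List Char → List (List Char)
  | [] => [[]]
  | c :: rest =>
    if c = '-' then [] :: splitDash rest
    else
      match splitDash rest with
      | [] => [[c]]
      | h :: t => (c :: h) :: t

theorem splitDash_ne_nil (l : List Char) : splitDash l ≠ [] := by
  cases l with
  | nil => simp [splitDash]
  | cons c rest =>
    simp only [splitDash]
    split
    · simp
    · cases h : splitDash rest <;> simp

theorem splitOn_go_eq (fuel : Nat) : ∀ (l cur : List Char) (acc : List (List Char)),
    l.length < fuel →
    PySem.Chars.splitOn.go ['-'] fuel l cur acc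
      = acc.reverse ++ (match splitDash l with
          | [] => []
          | h :: t => (cur.reverse ++ h) :: t) := by
  induction fuel with
  | zero => intro l cur acc h; omega
  | succ fuel ih =>
    intro l cur acc h
    cases l with
    | nil =>
      rw [PySem.Chars.splitOn.go.eq_def]
      simp [splitDash]
    | cons c rest =>
      rw [PySem.Chars.splitOn.go.eq_def]
      simp only []
      by_cases hc : c = '-'
      · subst hc
        have hpre : List.isPrefixOf ['-'] ('-' :: rest) = true := by simp [List.isPrefixOf]
        rw [if_pos hpre]
        rw [ih _ _ _ (by simpa using Nat.lt_of_succ_lt_succ h)]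
        obtain ⟨hh, tt, hst⟩ : ∃ hh tt, splitDash rest = hh :: tt := by
          cases hs : splitDash rest with
          | nil => exact absurd hs (splitDash_ne_nil rest)
          | cons a b => exact ⟨a, b, rfl⟩
        simp [splitDash, hst]
      · have hpre : List.isPrefixOf ['-'] (c :: rest) = false := by
          simp [List.isPrefixOf]; exact fun hx => absurd hx.symm hc
        rw [if_neg (by simp [hpre])]
        rw [ih _ _ _ (by simpa using Nat.lt_of_succ_lt_succ h)]
        obtain ⟨hh, tt, hst⟩ : ∃ hh tt, splitDash rest = hh :: tt := by
          cases hs : splitDash rest with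
          | nil => exact absurd hs (splitDash_ne_nil rest)
          | cons a b => exact ⟨a, b, rfl⟩
        simp [splitDash, hst, hc]

theorem splitOn_eq_splitDash (l : List Char) :
    PySem.Chars.splitOn l ['-'] = splitDash l := by
  unfold PySem.Chars.splitOn
  rw [splitOn_go_eq (l.length + 1) l [] [] (by omega)]
  obtain ⟨hh, tt, hst⟩ : ∃ hh tt, splitDash l = hh :: tt := by
    cases hs : splitDash l with
    | nil => exact absurd hs (splitDash_ne_nil l)
    | cons a b => exact ⟨a, b, rfl⟩
  simp [hst]

-- every segment is dash-free
theorem splitDash_no_dash (l : List Char) : ∀ part ∈ splitDash l, '-' ∉ part := by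
  induction l with
  | nil => simp [splitDash]
  | cons c rest ih =>
    simp only [splitDash]
    split
    · intro part hp
      rcases List.mem_cons.mp hp with h | h
      · simp [h]
      · exact ih part h
    · rename_i hc
      cases hs : splitDash rest with
      | nil => exact absurd hs (splitDash_ne_nil rest)
      | cons a b =>
        intro part hp
        rcases List.mem_cons.mp hp with h | h
        · subst h
          intro hm
          rcases List.mem_cons.mp hm with h | h
          · exact hc h.symm
          · exact ih a (by simp [hs]) h
        · exact ih part (by simp [hs, h])

-- re-joining with dashes reconstructs the input
def joinDash : List (List Char) → List Char
  | [] => []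
  | [x] => x
  | x :: xs => x ++ '-' :: joinDash xs

theorem joinDash_splitDash (l : List Char) : joinDash (splitDash l) = l := by
  induction l with
  | nil => simp [splitDash, joinDash]
  | cons c rest ih =>
    simp only [splitDash]
    split
    · rename_i hc
      subst hc
      cases hs : splitDash rest with
      | nil => exact absurd hs (splitDash_ne_nil rest)
      | cons a b => rw [hs] at ih; simp [joinDash]; exact ih
    · cases hs : splitDash rest with
      | nil => exact absurd hs (splitDash_ne_nil rest)
      | cons a b =>
        rw [hs] at ih
        cases b with
        | nil => simp [joinDash] at ih ⊢; exact ih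
        | cons x y => simp [joinDash] at ih ⊢; exact ih

theorem splitDash_of_no_dash (l : List Char) (h : '-' ∉ l) : splitDash l = [l] := by
  induction l with
  | nil => simp [splitDash]
  | cons c rest ih =>
    simp only [splitDash]
    rw [if_neg (by intro hc; exact h (by simp [hc]))]
    rw [ih (by intro hm; exact h (by simp [hm]))]

theorem splitDash_append (a b : List Char) (h : '-' ∉ a) :
    splitDash (a ++ '-' :: b) = a :: splitDash b := by
  induction a with
  | nil => simp [splitDash]
  | cons c rest ih =>
    simp only [List.cons_append, splitDash]
    rw [if_neg (by intro hc; exact h (by simp [hc]))]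
    rw [ih (by intro hm; exact h (by simp [hm]))]

-- shape of a valid header: "00-" ++ trace(32) ++ "-" ++ span(16) ++ "-" ++ flags, dash-free fields
def HeaderStruct (cs t p f : List Char) : Prop :=
  cs = '0' :: '0' :: '-' :: (t ++ '-' :: (p ++ '-' :: f)) ∧
  t.length = 32 ∧ p.length = 16 ∧ '-' ∉ t ∧ '-' ∉ p ∧ '-' ∉ f

theorem lowerChar_eq_zero_iff (c : Char) : PySem.Chars.lowerChar c = '0' ↔ c = '0' := by
  unfold PySem.Chars.lowerChar PySem.Chars.isupper
  constructor
  · intro h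
    by_cases hu : ('A' ≤ c ∧ c ≤ 'Z')
    · exfalso
      rw [if_pos (by simp [hu.1, hu.2])] at h
      have h1 : 65 ≤ c.toNat := hu.1
      have h2 : c.toNat ≤ 90 := hu.2
      have hv : Nat.isValidChar (c.toNat + 32) := Or.inl (by omega)
      have := congrArg Char.toNat h
      rw [Char.toNat_ofNat, if_pos hv] at this
      have h0 : ('0' : Char).toNat = 48 := by decide
      omega
    · rwa [if_neg (by simpa using hu)] at h
  · intro h; subst h; rfl

theorem lower_eq_zeros_iff (t : List Char) :
    PySem.Chars.lower t = List.replicate 32 '0' ↔ t = List.replicate 32 '0' := by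
  rw [List.eq_replicate_iff, List.eq_replicate_iff]
  simp only [PySem.Chars.lower, List.length_map, List.mem_map, forall_exists_index, and_imp]
  constructor
  · rintro ⟨h1, h2⟩
    exact ⟨h1, fun b hb => (lowerChar_eq_zero_iff b).mp (h2 _ b hb rfl)⟩
  · rintro ⟨h1, h2⟩
    exact ⟨h1, fun x b hb he => he ▸ (lowerChar_eq_zero_iff b).mpr (h2 b hb)⟩

theorem equal_on_struct (s : String) (t p f : List Char) (h : HeaderStruct s.toList t p f) :
    parse_traceparent (some s) = parse_traceparent_alt (some s) := by
  obtain ⟨hcs, ht, hp2, hdt, hdp, hdf⟩ := h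
  have hne : s.toList.isEmpty = false := by rw [hcs]; rfl
  have hsplit : PySem.Chars.splitOn s.toList ['-'] = [['0', '0'], t, p, f] := by
    rw [splitOn_eq_splitDash, hcs]
    rw [show ('0' :: '0' :: '-' :: (t ++ '-' :: (p ++ '-' :: f)))
          = (['0', '0'] : List Char) ++ '-' :: (t ++ '-' :: (p ++ '-' :: f)) from rfl]
    rw [splitDash_append _ _ (by decide), splitDash_append _ _ hdt,
        splitDash_append _ _ hdp, splitDash_of_no_dash _ hdf]
  have hlen : s.toList.length = 53 + f.length := by
    rw [hcs]; simp [ht, hp2]; omega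
  have h3 : PySem.List.slice s.toList none (some 3) = ['0', '0', '-'] := by
    rw [PySem.List.slice_to s.toList (b := 3) (by norm_num), hcs]
    rfl
  have hsplit35 : s.toList = ('0' :: '0' :: '-' :: t) ++ '-' :: (p ++ '-' :: f) := by
    rw [hcs]; simp
  have hsplit52 : s.toList = (('0' :: '0' :: '-' :: t) ++ '-' :: p) ++ '-' :: f := by
    rw [hcs]; simp
  have h35 : PySem.List.pyGet? s.toList 35 = some '-' := by
    rw [hsplit35, show (35 : Int) = (('0' :: '0' :: '-' :: t).length : Int) by simp [ht]]
    exact PySem.List.pyGet?_append_length _ _ _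
  have h52 : PySem.List.pyGet? s.toList 52 = some '-' := by
    rw [hsplit52, show (52 : Int) = ((('0' :: '0' :: '-' :: t) ++ '-' :: p).length : Int) by
      simp [ht, hp2]]
    exact PySem.List.pyGet?_append_length _ _ _
  have hT : PySem.List.slice s.toList (some 3) (some 35) = t := by
    rw [PySem.List.slice_toNat s.toList (a := 3) (b := 35) (by norm_num) (by norm_num), hcs]
    rw [show List.drop (Int.toNat 3) ('0' :: '0' :: '-' :: (t ++ '-' :: (p ++ '-' :: f)))
          = t ++ '-' :: (p ++ '-' :: f) from rfl]
    exact List.take_left' ht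
  have hP : PySem.List.slice s.toList (some 36) (some 52) = p := by
    rw [PySem.List.slice_toNat s.toList (a := 36) (b := 52) (by norm_num) (by norm_num)]
    rw [show s.toList = ('0' :: '0' :: '-' :: t ++ ['-']) ++ (p ++ '-' :: f) by rw [hcs]; simp]
    rw [show Int.toNat 52 - Int.toNat 36 = 16 from rfl, show Int.toNat 36 = 36 from rfl]
    rw [List.drop_left' (by simp [ht])]
    exact List.take_left' hp2
  have hF : PySem.List.slice s.toList (some 53) none = f := by
    rw [PySem.List.slice_from s.toList (a := 53) (by norm_num)]
    rw [show Int.toNat 53 = 53 from rfl]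
    rw [show s.toList = ('0' :: '0' :: '-' :: t ++ '-' :: p ++ ['-']) ++ f by rw [hcs]; simp]
    exact List.drop_left' (by simp [ht, hp2])
  have hIsIn : PySem.Chars.isIn ['-'] f = false := by
    rw [PySem.Chars.isIn_eq_false_iff]
    exact fun inf => hdf (inf.mem (by simp))
  simp only [parse_traceparent, parse_traceparent_alt, hne, hsplit, hlen,
    PySem.Chars.slice_eq_listSlice, PySem.Chars.pyGet?_eq_listPyGet?, h3, h35, h52,
    hT, hP, hF, hIsIn, Bool.false_eq_true, if_false]
  have hg0 : PySem.List.pyGetD [(['0', '0'] : List Char), t, p, f] 0 [] = ['0', '0'] := rfl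
  have hg1 : PySem.List.pyGetD [(['0', '0'] : List Char), t, p, f] 1 [] = t := rfl
  have hg2 : PySem.List.pyGetD [(['0', '0'] : List Char), t, p, f] 2 [] = p := rfl
  simp only [hg0, hg1, hg2, List.length_cons, List.length_nil]
  rw [if_neg (show ¬(53 + f.length < 53) by omega)]
  rw [if_neg (show ¬((['0', '0', '-'] : List Char) ≠ ['0', '0', '-'] ∨
        some '-' ≠ some '-' ∨ some '-' ≠ some '-' ∨ False) by simp)]
  rw [if_neg (show ¬(0 + 1 + 1 + 1 + 1 ≠ 4 ∨ (['0', '0'] : List Char) ≠ ['0', '0']) by simp)]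
  simp only [ht, hp2]
  simp only [lower_eq_zeros_iff t]
  by_cases hC1 : ∃ x ∈ PySem.Chars.lower t, x ∉ pvHexChars
  · simp [hC1]
  · by_cases hC2 : ∃ x ∈ PySem.Chars.lower p, x ∉ pvHexChars
    · simp [hC1, hC2]
    · simp [hC1, hC2]

theorem A_fail (s : String) (h : ¬ ∃ t p f, HeaderStruct s.toList t p f) :
    parse_traceparent (some s) = (none, none) := by
  simp only [parse_traceparent, splitOn_eq_splitDash]
  split_ifs with h1 h2 h3 h4 h5 <;> try rfl
  exfalso
  apply h
  push Not at h2 h3 h5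
  obtain ⟨hlen4, h00⟩ := h2
  rcases hq : splitDash s.toList with _ | ⟨q0, _ | ⟨q1, _ | ⟨q2, _ | ⟨q3, _ | _⟩⟩⟩⟩ <;>
    rw [hq] at hlen4 <;> simp at hlen4
  rw [hq] at h00 h3 h5
  have hq0 : q0 = ['0', '0'] := by simpa using h00
  have hmem := splitDash_no_dash s.toList
  rw [hq] at hmem
  refine ⟨q1, q2, q3, ?_, by simpa using h3.1, by simpa using h5.1,
    hmem q1 (by simp), hmem q2 (by simp), hmem q3 (by simp)⟩
  have := joinDash_splitDash s.toList
  rw [hq, hq0] at this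
  rw [← this]
  rfl

theorem B_fail (s : String) (h : ¬ ∃ t p f, HeaderStruct s.toList t p f) :
    parse_traceparent_alt (some s) = (none, none) := by
  simp only [parse_traceparent_alt, PySem.Chars.slice_eq_listSlice,
    PySem.Chars.pyGet?_eq_listPyGet?]
  split_ifs with h1 h2 h3 h4 <;> try rfl
  exfalso
  apply h
  push Not at h2 h3
  obtain ⟨hs3, hs35, hs52, hsIn⟩ := h2
  obtain ⟨hsupT, hsupP⟩ := h3
  set l := s.toList with hl
  have hlen : 53 ≤ l.length := by omega
  -- the three fields
  set t := List.take 32 (List.drop 3 l) with hteq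
  set p := List.take 16 (List.drop 36 l) with hpeq
  set f := List.drop 53 l with hfeq
  have htake3 : List.take 3 l = ['0', '0', '-'] := by
    rw [PySem.List.slice_to l (b := 3) (by norm_num)] at hs3
    exact hs3
  have hTs : PySem.List.slice l (some 3) (some 35) = t := by
    rw [PySem.List.slice_toNat l (a := 3) (b := 35) (by norm_num) (by norm_num)]
    rfl
  have hPs : PySem.List.slice l (some 36) (some 52) = p := by
    rw [PySem.List.slice_toNat l (a := 36) (b := 52) (by norm_num) (by norm_num)]
    rfl
  have hFs : PySem.List.slice l (some 53) none = f := by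
    rw [PySem.List.slice_from l (a := 53) (by norm_num)]
    rfl
  have h35' : l[35]? = some '-' := by
    rw [PySem.List.pyGet?_of_nonneg l (i := 35) (by norm_num)] at hs35
    exact hs35
  have h52' : l[52]? = some '-' := by
    rw [PySem.List.pyGet?_of_nonneg l (i := 52) (by norm_num)] at hs52
    exact hs52
  have h35lt : 35 < l.length := by omega
  have h52lt : 52 < l.length := by omega
  have hg35 : l[35] = '-' := by
    have := List.getElem?_eq_getElem h35lt
    rw [h35'] at this
    exact (Option.some.inj this).symm
  have hg52 : l[52] = '-' := by
    have := List.getElem?_eq_getElem h52lt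
    rw [h52'] at this
    exact (Option.some.inj this).symm
  -- reconstruction of l from the fields
  have hrec : l = ['0', '0', '-'] ++ t ++ '-' :: (p ++ '-' :: f) := by
    conv_lhs => rw [← List.take_append_drop 35 l]
    rw [List.drop_eq_getElem_cons h35lt, hg35]
    rw [show (35 : Nat) = 3 + 32 from rfl, List.take_add, htake3]
    conv_lhs => rw [show (35 : Nat) + 1 = 36 from rfl,
      ← List.take_append_drop 16 (List.drop 36 l)]
    rw [List.drop_drop, show (16 : Nat) + 36 = 52 from rfl]
    rw [List.drop_eq_getElem_cons h52lt, hg52]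
  have htlen : t.length = 32 := by
    rw [hteq]
    simp only [List.length_take, List.length_drop]
    omega
  have hplen : p.length = 16 := by
    rw [hpeq]
    simp only [List.length_take, List.length_drop]
    omega
  -- dash-freeness
  have hhexT : ∀ x ∈ t, x ∈ pvHexChars ∨ PySem.Chars.lowerChar x ∈ pvHexChars := by
    intro x hx
    right
    rw [hTs] at hsupT
    rw [PySem.Set.issuperset_iff] at hsupT
    have := hsupT (PySem.Chars.lowerChar x) (by
      rw [PySem.Set.mem_ofList]
      exact List.mem_map_of_mem hx)
    rwa [PySem.Set.mem_ofList] at this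
  have hdashT : '-' ∉ t := by
    intro hx
    have := hhexT '-' hx
    rcases this with hc | hc <;> revert hc <;> decide
  have hhexP : ∀ x ∈ p, PySem.Chars.lowerChar x ∈ pvHexChars := by
    intro x hx
    rw [hPs] at hsupP
    rw [PySem.Set.issuperset_iff] at hsupP
    have := hsupP (PySem.Chars.lowerChar x) (by
      rw [PySem.Set.mem_ofList]
      exact List.mem_map_of_mem hx)
    rwa [PySem.Set.mem_ofList] at this
  have hdashP : '-' ∉ p := by
    intro hx
    have := hhexP '-' hx
    revert this
    decide
  have hdashF : '-' ∉ f := by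
    intro hx
    rw [hFs] at hsIn
    have hsIn2 : PySem.Chars.isIn ['-'] f = false := by
      revert hsIn
      cases PySem.Chars.isIn ['-'] f <;> simp
    rw [PySem.Chars.isIn_eq_false_iff] at hsIn2
    obtain ⟨l1, l2, hsplit⟩ := List.append_of_mem hx
    exact hsIn2 ⟨l1, l2, by simp [hsplit]⟩
  exact ⟨t, p, f, by simpa using hrec, htlen, hplen, hdashT, hdashP, hdashF⟩

-- ===== VERDICT (by name: the statement is the Claim_ definition above) =====
theorem parse_traceparent_spec : Claim_equal_parse_traceparent := by
  intro tp _
  unfold Spec_parse_traceparent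
  cases tp with
  | none => rfl
  | some s =>
    by_cases h : ∃ t p f, HeaderStruct s.toList t p f
    · obtain ⟨t, p, f, hs⟩ := h
      exact equal_on_struct s t p f hs
    · rw [A_fail s h, B_fail s h]
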